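-- pv_equiv track=rewrite | github.com/passwordthere/aritnet | demo_rotation.py | get_extended_corner
-- ===== SOURCE A (Python) =====
-- def get_extended_corner(center1, center2, height, width):
--     difference_x, difference_y = center1[0] - center2[0], center1[1] - center2[1]
--     center1 = list(center1)
--     center2 = list(center2)
--     while 0 <= center2[0] < height and 0 <= center2[1] < width:
--         center2[0] = center2[0] - difference_x
--         center2[1] = center2[1] - difference_y
--     while 0 <= center1[0] < height and 0 <= center1[1] < width:
--         center1[0] = center1[0] + difference_x
--         center1[1] = center1[1] + difference_y
--     center1[0] = int(center1[0])
--     center1[1] = int(center1[1])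
--     center2[0] = int(center2[0])
--     center2[1] = int(center2[1])
--     return center1, center2
-- ===== SOURCE B (Python) =====
-- def _axis_exit(v, s, bound):
--     # assumes 0 <= v < bound; smallest n >= 1 with v + n*s outside [0, bound), or None if s == 0
--     if s > 0:
--         return -((v - bound) // s)      # ceil((bound - v) / s)
--     if s < 0:
--         return v // (-s) + 1            # floor(v / -s) + 1
--     return None
--
--
-- def get_extended_corner(center1, center2, height, width):
--     dx, dy = center1[0] - center2[0], center1[1] - center2[1]
--
--     def jump(x, y, sx, sy):
--         # closed-form: land where the while-loop stepping by (sx, sy) would stop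
--         if not (0 <= x < height and 0 <= y < width):
--             return x, y
--         nx = _axis_exit(x, sx, height)
--         ny = _axis_exit(y, sy, width)
--         if nx is None:
--             n = ny if ny is not None else 0
--         elif ny is None:
--             n = nx
--         else:
--             n = min(nx, ny)
--         return x + n * sx, y + n * sy
--
--     c1, c2 = list(center1), list(center2)
--     c2[0], c2[1] = jump(c2[0], c2[1], -dx, -dy)
--     c1[0], c1[1] = jump(c1[0], c1[1], dx, dy)
--     return c1, c2
-- ===== Notes on version B (the rewrite author's own statement) =====
-- stated objective: alternative
-- what changed: Replaces both step-by-step while-loops with a closed-form per-axis exit-step count (ceiling/floor division) and a single jump to the exit point.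
import Mathlib
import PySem

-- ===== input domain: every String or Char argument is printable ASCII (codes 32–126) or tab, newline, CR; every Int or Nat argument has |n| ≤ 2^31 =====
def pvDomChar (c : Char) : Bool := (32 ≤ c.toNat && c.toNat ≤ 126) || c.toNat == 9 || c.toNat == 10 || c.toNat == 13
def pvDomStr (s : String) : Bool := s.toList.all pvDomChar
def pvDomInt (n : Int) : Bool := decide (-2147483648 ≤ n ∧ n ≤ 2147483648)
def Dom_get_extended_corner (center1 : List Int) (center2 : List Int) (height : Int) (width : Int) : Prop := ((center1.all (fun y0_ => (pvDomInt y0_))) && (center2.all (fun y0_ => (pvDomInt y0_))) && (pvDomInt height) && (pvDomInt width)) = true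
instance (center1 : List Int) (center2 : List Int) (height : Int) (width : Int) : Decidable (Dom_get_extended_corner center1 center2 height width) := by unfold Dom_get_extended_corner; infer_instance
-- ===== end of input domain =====

-- B replaces A's two step-by-step while-loops with a closed-form per-axis exit-step count
-- (ceiling/floor division) and a single jump to the exit point; A mutates only its local
-- copies, so the equivalence about the return value is the whole behaviour.

-- ===== PORT A =====
-- one while-loop of A: step (x, y) by (sx, sy) while inside the box, structurally on a fuel
-- counter (the fuel only makes the function total — pvFuel bounds the loop's iteration count
-- wherever the Python loop terminates, and where it diverges (zero step inside the box,
-- excluded by Pre_) every fuel value returns the unchanged point; it changes no value A returns).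
def pvFuel (h w sx sy x y : Int) : Nat :=
  (if 0 < sx then h - x else x + 1).toNat + (if 0 < sy then w - y else y + 1).toNat

def pvLoopF (h w sx sy : Int) : Nat → Int → Int → Int × Int
  | 0, x, y => (x, y)
  | f + 1, x, y =>
    if 0 ≤ x ∧ x < h ∧ 0 ≤ y ∧ y < w then pvLoopF h w sx sy f (x + sx) (y + sy)
    else (x, y)

def pvLoop (h w sx sy x y : Int) : Int × Int :=
  pvLoopF h w sx sy (pvFuel h w sx sy x y) x y

def get_extended_corner (center1 : List Int) (center2 : List Int) (height : Int) (width : Int) : List Int × List Int :=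
  match PySem.List.pyGet? center1 0, PySem.List.pyGet? center1 1,
        PySem.List.pyGet? center2 0, PySem.List.pyGet? center2 1 with
  | some a0, some a1, some b0, some b1 =>
    let dx := a0 - b0
    let dy := a1 - b1
    let p2 := pvLoop height width (-dx) (-dy) b0 b1      -- while loop on center2 (subtracts the difference)
    let p1 := pvLoop height width dx dy a0 a1            -- while loop on center1 (adds the difference)
    ((center1.set 0 p1.1).set 1 p1.2, (center2.set 0 p2.1).set 1 p2.2)
  | _, _, _, _ => (center1, center2)                     -- IndexError in Python: excluded by Pre_

-- ===== PORT B =====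
-- _axis_exit of Source B
def pvAxisExit (v s bound : Int) : Option Int :=
  if 0 < s then some (-(PySem.Int.floordiv (v - bound) s))
  else if s < 0 then some (PySem.Int.floordiv v (-s) + 1)
  else none

-- the n-combining if-chain of Source B's jump
def pvCombine (nx ny : Option Int) : Int :=
  match nx, ny with
  | none, none => 0
  | none, some b => b
  | some a, none => a
  | some a, some b => min a b

-- jump of Source B
def pvJump (h w sx sy x y : Int) : Int × Int :=
  if 0 ≤ x ∧ x < h ∧ 0 ≤ y ∧ y < w then
    let n := pvCombine (pvAxisExit x sx h) (pvAxisExit y sy w)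
    (x + n * sx, y + n * sy)
  else (x, y)

def get_extended_corner_alt (center1 : List Int) (center2 : List Int) (height : Int) (width : Int) : List Int × List Int :=
  match center1, center2 with
  | a0 :: a1 :: r1, b0 :: b1 :: r2 =>
    let dx := a0 - b0
    let dy := a1 - b1
    let p2 := pvJump height width (-dx) (-dy) b0 b1
    let p1 := pvJump height width dx dy a0 a1
    (p1.1 :: p1.2 :: r1, p2.1 :: p2.2 :: r2)
  | _, _ => (center1, center2)                           -- IndexError in Python: excluded by Pre_

-- ===== PRECONDITION & SPEC =====
-- Pre_ excludes exactly the inputs on which A does not return: lists shorter than 2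
-- (IndexError) and a zero difference with center2 inside the box (the while loop diverges).
def Pre_get_extended_corner (center1 : List Int) (center2 : List Int) (height : Int) (width : Int) : Prop :=
  2 ≤ center1.length ∧ 2 ≤ center2.length ∧
  ¬(center1.getD 0 0 = center2.getD 0 0 ∧ center1.getD 1 0 = center2.getD 1 0 ∧
    0 ≤ center2.getD 0 0 ∧ center2.getD 0 0 < height ∧ 0 ≤ center2.getD 1 0 ∧ center2.getD 1 0 < width)
instance (center1 : List Int) (center2 : List Int) (height : Int) (width : Int) : Decidable (Pre_get_extended_corner center1 center2 height width) := by unfold Pre_get_extended_corner; infer_instance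

def pvWitness_get_extended_corner : List Int × List Int × Int × Int := ([0, 0], [1, 1], 3, 3)

def Spec_get_extended_corner (center1 : List Int) (center2 : List Int) (height : Int) (width : Int) (out : List Int × List Int) : Prop := out = get_extended_corner_alt center1 center2 height width
instance (center1 : List Int) (center2 : List Int) (height : Int) (width : Int) (out : List Int × List Int) : Decidable (Spec_get_extended_corner center1 center2 height width out) := by unfold Spec_get_extended_corner; infer_instance

-- ===== CLAIM (what is proved, stated in full; the proofs are below) =====
def Claim_equal_get_extended_corner : Prop := ∀ (center1 : List Int) (center2 : List Int) (height : Int) (width : Int), Dom_get_extended_corner center1 center2 height width → Pre_get_extended_corner center1 center2 height width → Spec_get_extended_corner center1 center2 height width (get_extended_corner center1 center2 height width)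

-- ===== LEMMAS AND PROOFS =====

-- stepping once shifts every per-axis exit count down by one (vacuous for a zero step)
lemma pvAxisExit_shift (v s bound : Int) :
    pvAxisExit (v + s) s bound = (pvAxisExit v s bound).map (· - 1) := by
  unfold pvAxisExit
  rcases lt_trichotomy s 0 with hs | hs | hs
  · simp only [if_neg (by omega : ¬ 0 < s), if_pos hs, Option.map_some]
    have h0 : 0 < -s := by omega
    obtain ⟨h1, h2⟩ := (PySem.Int.floordiv_eq_iff_of_pos h0).mp
      (rfl : PySem.Int.floordiv v (-s) = PySem.Int.floordiv v (-s))
    have heq : PySem.Int.floordiv (v + s) (-s) = PySem.Int.floordiv v (-s) - 1 := by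
      rw [PySem.Int.floordiv_eq_iff_of_pos h0]
      constructor <;> nlinarith
    rw [heq]; ring_nf
  · simp [hs]
  · simp only [if_pos hs, Option.map_some]
    obtain ⟨h1, h2⟩ := (PySem.Int.floordiv_eq_iff_of_pos hs).mp
      (rfl : PySem.Int.floordiv (v - bound) s = PySem.Int.floordiv (v - bound) s)
    have heq : PySem.Int.floordiv (v + s - bound) s = PySem.Int.floordiv (v - bound) s + 1 := by
      rw [PySem.Int.floordiv_eq_iff_of_pos hs]
      constructor <;> nlinarith
    rw [heq]; ring_nf

-- inside the axis range every exit count is at least 1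
lemma pvAxisExit_ge_one {v s bound c : Int} (hv0 : 0 ≤ v) (hvb : v < bound)
    (hc : pvAxisExit v s bound = some c) : 1 ≤ c := by
  unfold pvAxisExit at hc
  split_ifs at hc with hs1 hs2
  · obtain ⟨h1, h2⟩ := (PySem.Int.neg_floordiv_neg_eq_iff_of_pos (a := bound - v) (q := c) hs1).mp
      (by rw [show -(bound - v) = v - bound by ring]; exact Option.some.inj hc)
    by_contra hlt
    nlinarith [mul_le_mul_of_nonneg_right (show c ≤ 0 by omega) (le_of_lt hs1)]
  · have h0 : 0 < -s := by omega
    obtain ⟨h1, h2⟩ := (PySem.Int.floordiv_eq_iff_of_pos h0).mp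
      (rfl : PySem.Int.floordiv v (-s) = PySem.Int.floordiv v (-s))
    have hc' := Option.some.inj hc
    have hq : 0 ≤ PySem.Int.floordiv v (-s) := by
      by_contra hq
      nlinarith [mul_le_mul_of_nonneg_right
        (show PySem.Int.floordiv v (-s) + 1 ≤ 0 by omega) (le_of_lt h0)]
    omega

-- if the next step leaves the axis range, the exit count is exactly 1
lemma pvAxisExit_exit_one {v s bound : Int} (hv0 : 0 ≤ v) (hvb : v < bound)
    (hout : v + s < 0 ∨ bound ≤ v + s) : pvAxisExit v s bound = some 1 := by
  unfold pvAxisExit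
  rcases lt_trichotomy s 0 with hs | hs | hs
  · have hvs : v + s < 0 := by rcases hout with h | h <;> omega
    have h0 : 0 < -s := by omega
    have heq : PySem.Int.floordiv v (-s) = 0 := by
      rw [PySem.Int.floordiv_eq_iff_of_pos h0]; constructor <;> nlinarith
    simp [if_neg (by omega : ¬ 0 < s), if_pos hs, heq]
  · omega
  · have hvs : bound ≤ v + s := by rcases hout with h | h <;> omega
    have heq : PySem.Int.floordiv (v - bound) s = -1 := by
      rw [PySem.Int.floordiv_eq_iff_of_pos hs]; constructor <;> nlinarith
    simp [if_pos hs, heq]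

-- a zero step on an axis is exactly an exit count of none
lemma pvAxisExit_eq_none_iff (v s bound : Int) : pvAxisExit v s bound = none ↔ s = 0 := by
  unfold pvAxisExit; split_ifs <;> simp <;> omega

-- the closed-form jump is invariant under one loop step
lemma pvJump_step (h w sx sy x y : Int)
    (hin : 0 ≤ x ∧ x < h ∧ 0 ≤ y ∧ y < w) (hz : ¬(sx = 0 ∧ sy = 0)) :
    pvJump h w sx sy x y = pvJump h w sx sy (x + sx) (y + sy) := by
  obtain ⟨hx0, hxh, hy0, hyw⟩ := hin
  rw [pvJump, if_pos ⟨hx0, hxh, hy0, hyw⟩, pvJump]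
  by_cases hin' : 0 ≤ x + sx ∧ x + sx < h ∧ 0 ≤ y + sy ∧ y + sy < w
  · rw [if_pos hin', pvAxisExit_shift, pvAxisExit_shift]
    rcases hA : pvAxisExit x sx h with _ | a <;> rcases hB : pvAxisExit y sy w with _ | b
    · exact absurd ⟨(pvAxisExit_eq_none_iff x sx h).mp hA,
        (pvAxisExit_eq_none_iff y sy w).mp hB⟩ hz
    · simp only [Option.map_some, Option.map_none, pvCombine, Prod.mk.injEq]
      constructor <;> ring
    · simp only [Option.map_some, Option.map_none, pvCombine, Prod.mk.injEq]
      constructor <;> ring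
    · simp only [Option.map_some, pvCombine, Prod.mk.injEq]
      rw [show min (a - 1) (b - 1) = min a b - 1 by omega]
      constructor <;> ring
  · rw [if_neg hin']
    have hone : pvAxisExit x sx h = some 1 ∨ pvAxisExit y sy w = some 1 := by
      rcases (by omega : x + sx < 0 ∨ h ≤ x + sx ∨ y + sy < 0 ∨ w ≤ y + sy) with h' | h' | h' | h'
      · exact Or.inl (pvAxisExit_exit_one hx0 hxh (Or.inl h'))
      · exact Or.inl (pvAxisExit_exit_one hx0 hxh (Or.inr h'))
      · exact Or.inr (pvAxisExit_exit_one hy0 hyw (Or.inl h'))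
      · exact Or.inr (pvAxisExit_exit_one hy0 hyw (Or.inr h'))
    have hn1 : pvCombine (pvAxisExit x sx h) (pvAxisExit y sy w) = 1 := by
      rcases hA : pvAxisExit x sx h with _ | a <;> rcases hB : pvAxisExit y sy w with _ | b <;>
        rw [hA, hB] at hone <;> simp only [pvCombine]
      · rcases hone with h' | h' <;> exact absurd h' (by simp)
      · rcases hone with h' | h'
        · exact absurd h' (by simp)
        · exact Option.some.inj h'
      · rcases hone with h' | h'
        · exact Option.some.inj h'
        · exact absurd h' (by simp)
      · have ha := pvAxisExit_ge_one hx0 hxh hA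
        have hb := pvAxisExit_ge_one hy0 hyw hB
        rcases hone with h' | h' <;> have := Option.some.inj h' <;> omega
    rw [hn1]; simp

-- with a zero step on both axes the loop never moves, whatever the fuel
lemma pvLoopF_zero_step (h w : Int) (f : Nat) (x y : Int) :
    pvLoopF h w 0 0 f x y = (x, y) := by
  induction f generalizing x y with
  | zero => rfl
  | succ f ih => simp only [pvLoopF, add_zero]; split <;> [exact ih x y; rfl]

-- each loop step strictly shrinks the fuel measure
lemma pvFuel_decrease (h w sx sy x y : Int)
    (hin : 0 ≤ x ∧ x < h ∧ 0 ≤ y ∧ y < w) (hz : ¬(sx = 0 ∧ sy = 0)) :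
    pvFuel h w sx sy (x + sx) (y + sy) < pvFuel h w sx sy x y := by
  unfold pvFuel; split_ifs <;> omega

-- with enough fuel, A's loop lands exactly where B's closed-form jump lands
lemma pvLoopF_eq_pvJump (h w sx sy : Int) (f : Nat) (x y : Int)
    (hf : pvFuel h w sx sy x y ≤ f) :
    pvLoopF h w sx sy f x y = pvJump h w sx sy x y := by
  induction f generalizing x y with
  | zero =>
    have hout : ¬(0 ≤ x ∧ x < h ∧ 0 ≤ y ∧ y < w) := by
      intro hin; unfold pvFuel at hf; revert hf; split_ifs <;> omega
    rw [pvJump, if_neg hout]; rfl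
  | succ f ih =>
    by_cases hin : 0 ≤ x ∧ x < h ∧ 0 ≤ y ∧ y < w
    · by_cases hz : sx = 0 ∧ sy = 0
      · obtain ⟨h1, h2⟩ := hz; subst h1; subst h2
        rw [pvLoopF_zero_step, pvJump, if_pos hin]
        simp [pvAxisExit, pvCombine]
      · have hstep : pvLoopF h w sx sy (f + 1) x y = pvLoopF h w sx sy f (x + sx) (y + sy) := by
          simp only [pvLoopF, if_pos hin]
        have hlt := pvFuel_decrease h w sx sy x y hin hz
        rw [hstep, ih (x + sx) (y + sy) (by omega), ← pvJump_step h w sx sy x y hin hz]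
    · simp only [pvLoopF, if_neg hin, pvJump]

-- A's loop lands exactly where B's closed-form jump lands
lemma pvLoop_eq_pvJump (h w sx sy x y : Int) :
    pvLoop h w sx sy x y = pvJump h w sx sy x y := by
  exact pvLoopF_eq_pvJump h w sx sy _ x y le_rfl

-- ===== VERDICT (by name: the statement is the Claim_ definition above) =====
theorem get_extended_corner_spec : Claim_equal_get_extended_corner := by
  intro c1 c2 h w _ hpre
  obtain ⟨hl1, hl2, -⟩ := hpre
  match c1, hl1 with
  | a0 :: a1 :: r1, _ =>
    match c2, hl2 with
    | b0 :: b1 :: r2, _ =>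
      show get_extended_corner (a0 :: a1 :: r1) (b0 :: b1 :: r2) h w =
        get_extended_corner_alt (a0 :: a1 :: r1) (b0 :: b1 :: r2) h w
      unfold get_extended_corner get_extended_corner_alt
      simp [PySem.List.pyGet?, PySem.List.pyIdx?, pvLoop_eq_pvJump, List.set,
        show (0:Int) ≤ (r1.length : Int) + 1 by positivity,
        show (0:Int) ≤ (r2.length : Int) + 1 by positivity]
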